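-- pv_equiv track=rewrite | github.com/DicksonLegend/ModelDoctor-AI- | backend/core/suggestions.py | _parse_gemini_text
-- ===== SOURCE A (Python) =====
-- def _parse_gemini_text(ai_text: str, fallback: list) -> list:
--     """Fallback: extract enhanced explanations from plain text response."""
--     enhanced = [s.copy() for s in fallback]
--
--     # Try to find explanation-like text for each suggestion
--     lines = ai_text.split("\n")
--     explanation_texts = []
--     current_exp = []
--
--     for line in lines:
--         stripped = line.strip()
--         if stripped.lower().startswith("explanation:"):
--             if current_exp:
--                 explanation_texts.append(" ".join(current_exp))
--             current_exp = [stripped.split(":", 1)[1].strip()]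
--         elif current_exp and stripped and not stripped.startswith(("-", "*", "Issue:", "Action:")):
--             current_exp.append(stripped)
--
--     if current_exp:
--         explanation_texts.append(" ".join(current_exp))
--
--     for i, exp in enumerate(explanation_texts):
--         if i < len(enhanced) and len(exp) > 20:
--             enhanced[i]["explanation"] = exp
--
--     return enhanced
-- ===== SOURCE B (Python) =====
-- def _is_marker(line):
--     return line.strip().lower().startswith("explanation:")
--
--
-- def _span_not_marker(lines):
--     """Longest prefix of non-marker lines, and the remainder."""
--     pre = []
--     i = 0
--     while i < len(lines) and not _is_marker(lines[i]):
--         pre.append(lines[i])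
--         i += 1
--     return pre, lines[i:]
--
--
-- def _blocks(lines):
--     """Partition into blocks, each starting at a marker line; text before the first marker is dropped."""
--     _, rest = _span_not_marker(lines)
--     out = []
--     while rest:
--         head, tail = rest[0], rest[1:]
--         body, rest = _span_not_marker(tail)
--         out.append([head] + body)
--     return out
--
--
-- def _block_text(block):
--     head = block[0].strip().split(":", 1)[1].strip()
--     body = [s for s in (l.strip() for l in block[1:])
--             if s and not s.startswith(("-", "*", "Issue:", "Action:"))]
--     return " ".join([head] + body)
--
--
-- def _parse_gemini_text(ai_text: str, fallback: list) -> list: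
--     """Fallback: extract enhanced explanations from plain text response."""
--     explanation_texts = [_block_text(b) for b in _blocks(ai_text.split("\n"))]
--     enhanced = [dict(s) for s in fallback]
--     for i, exp in enumerate(explanation_texts):
--         if i < len(enhanced) and len(exp) > 20:
--             enhanced[i]["explanation"] = exp
--     return enhanced
-- ===== Notes on version B (the rewrite author's own statement) =====
-- stated objective: alternative
-- what changed: Replaces A's single-pass accumulator (current_exp with flush-on-marker and final flush) by an explicit decomposition: partition the lines into marker-delimited blocks first, then map each block to its joined text, then run the attachment loop.
import Mathlib
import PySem

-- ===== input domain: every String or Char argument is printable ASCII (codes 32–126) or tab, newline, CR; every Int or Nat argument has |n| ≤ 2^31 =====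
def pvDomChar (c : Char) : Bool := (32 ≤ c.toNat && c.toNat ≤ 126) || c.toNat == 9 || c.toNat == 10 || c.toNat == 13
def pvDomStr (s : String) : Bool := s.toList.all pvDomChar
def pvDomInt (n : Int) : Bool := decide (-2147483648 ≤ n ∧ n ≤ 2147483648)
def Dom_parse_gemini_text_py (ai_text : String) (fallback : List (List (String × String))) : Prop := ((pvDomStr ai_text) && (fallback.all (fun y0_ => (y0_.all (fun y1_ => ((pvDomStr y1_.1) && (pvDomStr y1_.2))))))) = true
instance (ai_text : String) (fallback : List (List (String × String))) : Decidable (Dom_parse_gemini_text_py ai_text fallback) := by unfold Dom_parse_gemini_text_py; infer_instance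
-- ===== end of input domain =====

-- B replaces A's single-pass accumulator (flush-on-marker + final flush) by an explicit
-- decomposition: partition the lines into marker-delimited blocks, then map each block to its
-- text; same cost (objective: alternative). Return-value equivalence only (A mutates nothing
-- the caller sees: it works on copies).

-- shared helpers: both Python versions contain these exact expressions
-- line.strip().lower().startswith("explanation:")
def pvIsMarker (line : String) : Bool :=
  PySem.Str.startswith (PySem.Str.lower (PySem.Str.strip line)) "explanation:"

-- s and not s.startswith(("-", "*", "Issue:", "Action:"))  (s already stripped)
def pvKeep (s : String) : Bool :=
  (s != "") && !(PySem.Str.startswith s "-" || PySem.Str.startswith s "*" ||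
                 PySem.Str.startswith s "Issue:" || PySem.Str.startswith s "Action:")

-- line.strip().split(":", 1)[1].strip(); only used on marker lines, where the stripped line
-- starts with "explanation:" so index 1 exists (the getD defaults are unreachable)
def pvHeadText (line : String) : String :=
  PySem.Str.strip (((PySem.Str.splitMax? (PySem.Str.strip line) ":" 1).getD []).getD 1 "")

-- the final attachment loop, textually identical in both Python versions:
-- for i, exp in enumerate(texts): if i < len(enhanced) and len(exp) > 20: enhanced[i]["explanation"] = exp
def pvAttach (texts : List String) (enhanced : List (List (String × String))) :
    List (List (String × String)) :=
  (PySem.List.enumerate texts 0).foldl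
    (fun enh p =>
      if p.1 < (enh.length : Int) && PySem.Str.len p.2 > 20 then
        enh.modify p.1.toNat (fun d => ((PySem.Dict.mk d).insert "explanation" p.2).items)
      else enh)
    enhanced

-- ===== PORT A =====
-- the loop body of A's for-line loop; state = (explanation_texts, current_exp)
def pvStepA (st : List String × List String) (line : String) : List String × List String :=
  let stripped := PySem.Str.strip line
  if pvIsMarker line then
    ((if st.2.isEmpty then st.1 else st.1 ++ [PySem.Str.join " " st.2]), [pvHeadText line])
  else if !st.2.isEmpty && pvKeep stripped then
    (st.1, st.2 ++ [stripped])
  else st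

-- the trailing 'if current_exp: explanation_texts.append(...)'
def pvFlushA (p : List String × List String) : List String :=
  if p.2.isEmpty then p.1 else p.1 ++ [PySem.Str.join " " p.2]

def parse_gemini_text_py (ai_text : String) (fallback : List (List (String × String))) :
    List (List (String × String)) :=
  let enhanced := fallback.map (fun s => s)   -- s.copy()
  let lines := (PySem.Str.split? ai_text "\n").getD []   -- sep "\n" ≠ "", never none
  let texts := pvFlushA (lines.foldl pvStepA ([], []))
  pvAttach texts enhanced

-- ===== PORT B =====
-- _span_not_marker: longest non-marker prefix and the remainder
def pvSpanNM : List String → List String × List String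
  | [] => ([], [])
  | l :: t =>
    if pvIsMarker l then ([], l :: t)
    else
      let p := pvSpanNM t
      (l :: p.1, p.2)

theorem pvSpanNM_snd_le (l : List String) : (pvSpanNM l).2.length ≤ l.length := by
  induction l with
  | nil => simp [pvSpanNM]
  | cons h t ih =>
    simp only [pvSpanNM]
    split
    · simp
    · exact Nat.le_succ_of_le ih

-- the while-loop of _blocks: rest is empty or starts at a marker
def pvBlocksGo : List String → List (List String)
  | [] => []
  | h :: t =>
    let p := pvSpanNM t
    (h :: p.1) :: pvBlocksGo p.2
termination_by l => l.length
decreasing_by exact Nat.lt_succ_of_le (pvSpanNM_snd_le t)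

def pvBlocks (lines : List String) : List (List String) :=
  pvBlocksGo (pvSpanNM lines).2

def pvBlockText : List String → String
  | [] => ""   -- unreachable: every block is nonempty
  | h :: t =>
    PySem.Str.join " " (pvHeadText h :: ((t.map PySem.Str.strip).filter pvKeep))

def parse_gemini_text_py_alt (ai_text : String) (fallback : List (List (String × String))) :
    List (List (String × String)) :=
  let explanation_texts := (pvBlocks ((PySem.Str.split? ai_text "\n").getD [])).map pvBlockText
  let enhanced := fallback.map (fun s => s)   -- dict(s)
  pvAttach explanation_texts enhanced

-- ===== PRECONDITION & SPEC =====
def Spec_parse_gemini_text_py (ai_text : String) (fallback : List (List (String × String))) (out : List (List (String × String))) : Prop := out = parse_gemini_text_py_alt ai_text fallback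
instance (ai_text : String) (fallback : List (List (String × String))) (out : List (List (String × String))) : Decidable (Spec_parse_gemini_text_py ai_text fallback out) := by unfold Spec_parse_gemini_text_py; infer_instance

-- ===== CLAIM (what is proved, stated in full; the proofs are below) =====
def Claim_equal_parse_gemini_text_py : Prop := ∀ (ai_text : String) (fallback : List (List (String × String))), Dom_parse_gemini_text_py ai_text fallback → Spec_parse_gemini_text_py ai_text fallback (parse_gemini_text_py ai_text fallback)

-- ===== LEMMAS AND PROOFS =====

-- A's loop run with a nonempty current_exp produces: one text closing the current block
-- (extended by the kept stripped lines up to the next marker), then the texts of the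
-- remaining blocks.
theorem pvA_loop_cons (L : List String) : ∀ (ts cur : List String), cur ≠ [] →
    pvFlushA (L.foldl pvStepA (ts, cur)) =
      ts ++ (PySem.Str.join " " (cur ++ (((pvSpanNM L).1.map PySem.Str.strip).filter pvKeep)))
        :: (pvBlocksGo (pvSpanNM L).2).map pvBlockText := by
  induction L with
  | nil =>
    intro ts cur hcur
    obtain ⟨c, cs, rfl⟩ := List.exists_cons_of_ne_nil hcur
    simp [pvFlushA, pvSpanNM, pvBlocksGo]
  | cons l t ih =>
    intro ts cur hcur
    obtain ⟨c, cs, rfl⟩ := List.exists_cons_of_ne_nil hcur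
    simp only [List.foldl_cons, pvStepA, pvSpanNM]
    by_cases hm : pvIsMarker l = true
    · simp only [hm, if_true, List.isEmpty_cons, if_neg Bool.false_ne_true]
      rw [ih (ts ++ [PySem.Str.join " " (c :: cs)]) [pvHeadText l] (by simp)]
      simp [pvBlocksGo, pvBlockText]
    · simp only [hm, Bool.false_eq_true, if_false, List.isEmpty_cons, Bool.not_false,
        Bool.true_and]
      by_cases hk : pvKeep (PySem.Str.strip l) = true
      · simp only [hk, if_true]
        rw [ih ts ((c :: cs) ++ [PySem.Str.strip l]) (by simp)]
        simp [hk, List.append_assoc]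
      · simp only [hk, Bool.false_eq_true, if_false]
        rw [ih ts (c :: cs) hcur]
        simp [hk]

-- A's loop started with an empty current_exp produces exactly B's block texts.
theorem pvA_loop_nil (L : List String) : ∀ (ts : List String),
    pvFlushA (L.foldl pvStepA (ts, [])) =
      ts ++ (pvBlocksGo (pvSpanNM L).2).map pvBlockText := by
  induction L with
  | nil => intro ts; simp [pvFlushA, pvSpanNM, pvBlocksGo]
  | cons l t ih =>
    intro ts
    simp only [List.foldl_cons, pvStepA, pvSpanNM]
    by_cases hm : pvIsMarker l = true
    · simp only [hm, if_true, List.isEmpty_nil]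
      rw [pvA_loop_cons t ts [pvHeadText l] (by simp)]
      simp [pvBlocksGo, pvBlockText]
    · simp only [hm, Bool.false_eq_true, if_false, List.isEmpty_nil, Bool.not_true,
        Bool.false_and]
      rw [ih ts]

-- ===== VERDICT (by name: the statement is the Claim_ definition above) =====
theorem parse_gemini_text_py_spec : Claim_equal_parse_gemini_text_py := by
  intro ai_text fallback _
  unfold Spec_parse_gemini_text_py parse_gemini_text_py parse_gemini_text_py_alt pvBlocks
  simp only [pvA_loop_nil, List.nil_append]
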